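-- pv_equiv track=rewrite | github.com/PurthaShaariyaar/OA | finalData.py | getFinalData
-- ===== SOURCE A (Python) =====
-- def getFinalData(data, updates):
--     n = len(data)
--     # Create an auxiliary array to mark negations
--     negation_marks = [0] * (n + 1)
--
--     # Apply updates in the form of marking negations
--     for l, r in updates:
--         negation_marks[l-1] += 1  # Start negation
--         negation_marks[r] -= 1  # End negation
--
--     # Apply negation marks to data
--     negation_effect = 0
--     for i in range(n):
--         negation_effect += negation_marks[i]
--         # If negation_effect is odd, negate the current element
--         if negation_effect % 2 != 0:
--             data[i] = -data[i]
--
--     return data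
-- ===== SOURCE B (Python) =====
-- def getFinalData(data, updates):
--     # Parity view: an element must be negated iff an odd number of range
--     # boundaries lie at or before its position.  Mark boundary parities with
--     # Booleans, then decide every element independently from the number of
--     # marked boundaries in its prefix.  Builds a fresh list.
--     n = len(data)
--     boundary = [False] * (n + 1)
--     for l, r in updates:
--         boundary[l - 1] = not boundary[l - 1]
--         boundary[r] = not boundary[r]
--     return [-x if sum(boundary[:i + 1]) % 2 else x for i, x in enumerate(data)]
-- ===== Notes on version B (the rewrite author's own statement) =====
-- stated objective: alternative
-- what changed: Replaces the signed difference array and its running prefix-sum accumulator with Boolean boundary-parity marks and an independent per-index count of marked boundaries in each prefix, building a fresh list instead of mutating data in place; Pre_ excludes only the inputs on which both programs raise IndexError (an update endpoint outside Python's index range of the n+1-long marks array).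
import Mathlib
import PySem

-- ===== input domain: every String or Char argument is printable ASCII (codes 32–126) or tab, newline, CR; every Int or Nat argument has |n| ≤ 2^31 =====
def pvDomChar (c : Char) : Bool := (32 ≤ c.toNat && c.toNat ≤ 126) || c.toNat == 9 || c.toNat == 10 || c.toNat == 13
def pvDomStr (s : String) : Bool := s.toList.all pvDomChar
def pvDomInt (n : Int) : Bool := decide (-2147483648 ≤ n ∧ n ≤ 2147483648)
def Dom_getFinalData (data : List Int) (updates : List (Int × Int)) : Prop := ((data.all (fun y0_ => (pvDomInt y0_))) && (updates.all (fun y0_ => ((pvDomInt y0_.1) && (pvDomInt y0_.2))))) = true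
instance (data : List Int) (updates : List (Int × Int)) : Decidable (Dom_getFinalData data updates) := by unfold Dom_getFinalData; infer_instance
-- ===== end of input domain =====

-- B replaces A's signed difference array + running prefix-sum accumulator by Boolean boundary
-- parity marks and an independent per-index prefix count, building a fresh list (A mutates
-- `data` in place, B does not; the equivalence proved here is about the return value).


-- ===== PORT A =====
-- negation_marks[l-1] += 1; negation_marks[r] -= 1   (pyGetD/pySetD are exact Python indexing,
-- including the wrap of negative in-range indices)
def pvStepMarks (m : List Int) (p : Int × Int) : List Int :=
  let m1 := PySem.List.pySetD m (p.1 - 1) (PySem.List.pyGetD m (p.1 - 1) 0 + 1)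
  PySem.List.pySetD m1 p.2 (PySem.List.pyGetD m1 p.2 0 - 1)

-- one iteration of 'for i in range(n)': state = (negation_effect, data)
def pvStepNeg (marks : List Int) (st : Int × List Int) (i : Int) : Int × List Int :=
  let eff := st.1 + PySem.List.pyGetD marks i 0
  if PySem.Int.mod eff 2 ≠ 0 then
    (eff, PySem.List.pySetD st.2 i (-(PySem.List.pyGetD st.2 i 0)))
  else (eff, st.2)

def getFinalData (data : List Int) (updates : List (Int × Int)) : List Int :=
  let n := data.length
  let marks := updates.foldl pvStepMarks (List.replicate (n + 1) 0)
  ((PySem.List.pyRange 0 (n : Int) 1).foldl (pvStepNeg marks) (0, data)).2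

-- ===== PORT B =====
-- boundary[l-1] = not boundary[l-1]; boundary[r] = not boundary[r]
def pvStepTog (m : List Bool) (p : Int × Int) : List Bool :=
  let m1 := PySem.List.pySetD m (p.1 - 1) (!(PySem.List.pyGetD m (p.1 - 1) false))
  PySem.List.pySetD m1 p.2 (!(PySem.List.pyGetD m1 p.2 false))

-- sum(boundary[:i+1]) % 2  (a sum of Booleans counts the True entries)
def pvPrefixOdd (boundary : List Bool) (i : Int) : Bool :=
  decide (PySem.Int.mod (((PySem.List.slice boundary none (some (i + 1))).countP id : Nat) : Int) 2 ≠ 0)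

def getFinalData_alt (data : List Int) (updates : List (Int × Int)) : List Int :=
  let n := data.length
  let boundary := updates.foldl pvStepTog (List.replicate (n + 1) false)
  (PySem.List.enumerate data).map (fun p => if pvPrefixOdd boundary p.1 then -p.2 else p.2)

-- ===== PRECONDITION & SPEC =====
-- Pre_ is exactly A's non-raising domain: both update endpoints index the (n+1)-long marks
-- array without IndexError, i.e. l-1 and r lie in the Python index range [-(n+1), n]
-- (B raises on exactly the same inputs).
def Pre_getFinalData (data : List Int) (updates : List (Int × Int)) : Prop :=
  ∀ p ∈ updates, -(data.length : Int) ≤ p.1 ∧ p.1 ≤ (data.length : Int) + 1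
    ∧ -((data.length : Int) + 1) ≤ p.2 ∧ p.2 ≤ (data.length : Int)
instance (data : List Int) (updates : List (Int × Int)) : Decidable (Pre_getFinalData data updates) := by unfold Pre_getFinalData; infer_instance

def pvWitness_getFinalData : List Int × (List (Int × Int)) := ([1, 2, 3, 4], [(1, 3), (2, 4)])

def Spec_getFinalData (data : List Int) (updates : List (Int × Int)) (out : List Int) : Prop := out = getFinalData_alt data updates
instance (data : List Int) (updates : List (Int × Int)) (out : List Int) : Decidable (Spec_getFinalData data updates out) := by unfold Spec_getFinalData; infer_instance

-- ===== CLAIM (what is proved, stated in full; the proofs are below) =====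
def Claim_equal_getFinalData : Prop := ∀ (data : List Int) (updates : List (Int × Int)), Dom_getFinalData data updates → Pre_getFinalData data updates → Spec_getFinalData data updates (getFinalData data updates)

-- ===== LEMMAS AND PROOFS =====

-- resolved position of an in-range Python index in an array of length M (negative wraps: x % M)
def pvPos (M x : Int) : Int := PySem.Int.mod x M

-- net contribution of the updates to A's marks[j]  (M = marks length)
def pvMark (M : Int) (updates : List (Int × Int)) (j : Int) : Int :=
  (updates.map (fun p => (if pvPos M (p.1 - 1) = j then (1 : Int) else 0) + (if pvPos M p.2 = j then (-1 : Int) else 0))).sum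

-- prefix sum of the marks up to index i (A's negation_effect after step i)
def pvEff (M : Int) (updates : List (Int × Int)) (i : Int) : Int :=
  (updates.map (fun p => (if pvPos M (p.1 - 1) ≤ i then (1 : Int) else 0) - (if pvPos M p.2 ≤ i then (1 : Int) else 0))).sum

-- number of update endpoints resolving to position j
def pvEndCnt (M : Int) (updates : List (Int × Int)) (j : Int) : Int :=
  (updates.map (fun p => (if pvPos M (p.1 - 1) = j then (1 : Int) else 0) + (if pvPos M p.2 = j then (1 : Int) else 0))).sum

-- number of update endpoints resolving to a position ≤ i
def pvEndPre (M : Int) (updates : List (Int × Int)) (i : Int) : Int :=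
  (updates.map (fun p => (if pvPos M (p.1 - 1) ≤ i then (1 : Int) else 0) + (if pvPos M p.2 ≤ i then (1 : Int) else 0))).sum

theorem pvPos_of_nonneg (M x : Int) (h0 : 0 ≤ x) (h2 : x < M) : pvPos M x = x := by
  rw [pvPos, PySem.Int.mod_eq_emod_of_pos (by omega)]
  exact Int.emod_eq_of_lt h0 h2

theorem pvPos_of_neg (M x : Int) (h1 : -M ≤ x) (h0 : x < 0) : pvPos M x = x + M := by
  rw [pvPos, PySem.Int.mod_eq_emod_of_pos (by omega)]
  have h := Int.add_mul_emod_self_left (a := x) (b := M) (c := 1)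
  rw [mul_one] at h
  rw [← h]
  exact Int.emod_eq_of_lt (by omega) (by omega)

theorem pvPos_nonneg (M x : Int) (hM : 0 < M) : 0 ≤ pvPos M x := PySem.Int.mod_nonneg x hM

theorem pvPos_lt (M x : Int) (hM : 0 < M) : pvPos M x < M := PySem.Int.mod_lt x hM

theorem pySetD_wrap {α : Type} (m : List α) (x : Int) (v : α)
    (h1 : -(m.length : Int) ≤ x) (h2 : x < (m.length : Int)) :
    PySem.List.pySetD m x v = m.set (pvPos (m.length : Int) x).toNat v := by
  simp only [PySem.List.pySetD, PySem.List.pySet?, PySem.List.pyIdx?]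
  by_cases h0 : 0 ≤ x
  · rw [pvPos_of_nonneg _ _ h0 h2, if_pos h0, if_pos h2]
    simp
  · rw [pvPos_of_neg _ _ h1 (by omega), if_neg h0, if_pos h1]
    simp only [Option.map_some, Option.getD_some]
    congr 1
    omega

theorem pyGetD_wrap {α : Type} (m : List α) (x : Int) (d : α)
    (h1 : -(m.length : Int) ≤ x) (h2 : x < (m.length : Int)) :
    PySem.List.pyGetD m x d = m.getD (pvPos (m.length : Int) x).toNat d := by
  by_cases h0 : 0 ≤ x
  · rw [pvPos_of_nonneg _ _ h0 h2, PySem.List.pyGetD_eq_getElem m d h0 h2,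
      List.getD_eq_getElem m d (by omega)]
  · have hk : 0 < (-x).toNat := by omega
    have hk' : (-x).toNat ≤ m.length := by omega
    have hx : x = -(((-x).toNat : Nat) : Int) := by omega
    rw [pvPos_of_neg _ _ h1 (by omega), hx, PySem.List.pyGetD_neg_natCast m (-x).toNat d hk hk',
      List.getD_eq_getElem m d (by omega)]
    congr 1
    omega

-- ---- A's marks fold ----

theorem step_getD (m : List Int) (p : Int × Int)
    (h1 : -(m.length : Int) ≤ p.1 - 1) (h2 : p.1 - 1 < (m.length : Int))
    (h3 : -(m.length : Int) ≤ p.2) (h4 : p.2 < (m.length : Int)) (j : Nat) (hj : j < m.length) :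
    (pvStepMarks m p).getD j 0
      = m.getD j 0 + ((if pvPos (m.length : Int) (p.1 - 1) = (j : Int) then (1 : Int) else 0)
          + (if pvPos (m.length : Int) p.2 = (j : Int) then (-1 : Int) else 0)) := by
  have hMpos : (0:Int) < (m.length : Int) := by omega
  have hp1 := pvPos_nonneg (m.length : Int) (p.1 - 1) hMpos
  have hp1' := pvPos_lt (m.length : Int) (p.1 - 1) hMpos
  have hp2 := pvPos_nonneg (m.length : Int) p.2 hMpos
  have hp2' := pvPos_lt (m.length : Int) p.2 hMpos
  have ha : (pvPos (m.length : Int) (p.1 - 1)).toNat < m.length := by omega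
  set a := (pvPos (m.length : Int) (p.1 - 1)).toNat with hadef
  have em1 : PySem.List.pySetD m (p.1 - 1) (PySem.List.pyGetD m (p.1 - 1) 0 + 1)
      = m.set a (m[a] + 1) := by
    rw [pyGetD_wrap m _ 0 h1 h2, pySetD_wrap m _ _ h1 h2, List.getD_eq_getElem m 0 ha]
  have lm1 : (m.set a (m[a] + 1)).length = m.length := by simp
  have hbn : (pvPos (m.length : Int) p.2).toNat < m.length := by omega
  set b := (pvPos (m.length : Int) p.2).toNat with hbdef
  have em2 : pvStepMarks m p
      = (m.set a (m[a] + 1)).set b ((m.set a (m[a] + 1))[b]'(by omega) - 1) := by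
    rw [pvStepMarks, em1, pyGetD_wrap _ _ 0 (by rw [lm1]; exact h3) (by rw [lm1]; exact h4),
      pySetD_wrap _ _ _ (by rw [lm1]; exact h3) (by rw [lm1]; exact h4),
      List.getD_eq_getElem _ 0 (by rw [lm1]; exact (by rw [lm1] at *; omega))]
    simp only [lm1]
    rfl
  rw [em2]
  simp only [List.getD_eq_getElem?_getD, List.getElem?_set, lm1, List.getElem_set]
  have hij1 : (pvPos (m.length : Int) (p.1 - 1) = (j : Int)) ↔ a = j := by
    simp only [pvPos] at *; omega
  have hij2 : (pvPos (m.length : Int) p.2 = (j : Int)) ↔ b = j := by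
    simp only [pvPos] at *; omega
  by_cases e1 : a = j <;> by_cases e2 : b = j <;>
    simp [e1, e2, hj, hij1, hij2] <;> omega

theorem pvStepMarks_length (m : List Int) (p : Int × Int) : (pvStepMarks m p).length = m.length := by
  simp [pvStepMarks, PySem.List.length_pySetD]

theorem pvFoldMarks_length (updates : List (Int × Int)) (m : List Int) :
    (updates.foldl pvStepMarks m).length = m.length := by
  induction updates generalizing m with
  | nil => rfl
  | cons p ups ih => simp [List.foldl_cons, ih, pvStepMarks_length]

theorem pvFoldMarks_getD (updates : List (Int × Int)) (m : List Int)
    (hb : ∀ p ∈ updates, -(m.length : Int) ≤ p.1 - 1 ∧ p.1 - 1 < (m.length : Int)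
            ∧ -(m.length : Int) ≤ p.2 ∧ p.2 < (m.length : Int))
    (j : Nat) (hj : j < m.length) :
    (updates.foldl pvStepMarks m).getD j 0 = m.getD j 0 + pvMark (m.length : Int) updates j := by
  induction updates generalizing m with
  | nil => simp [pvMark]
  | cons p ups ih =>
    have hp := hb p (List.mem_cons_self ..)
    have hlen := pvStepMarks_length m p
    rw [List.foldl_cons,
      ih (pvStepMarks m p) (by rw [hlen]; exact fun q hq => hb q (List.mem_cons_of_mem _ hq)) (by omega),
      step_getD m p hp.1 hp.2.1 hp.2.2.1 hp.2.2.2 j hj, hlen]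
    simp only [pvMark, List.map_cons, List.sum_cons]
    ring

theorem pvEff_succ (M : Int) (updates : List (Int × Int)) (i : Int) :
    pvEff M updates i = pvEff M updates (i - 1) + pvMark M updates i := by
  induction updates with
  | nil => simp [pvEff, pvMark]
  | cons p ups ih =>
    simp only [pvEff, pvMark, List.map_cons, List.sum_cons] at *
    have : (if pvPos M (p.1 - 1) ≤ i then (1:Int) else 0) - (if pvPos M p.2 ≤ i then (1:Int) else 0)
        = ((if pvPos M (p.1 - 1) ≤ i - 1 then (1:Int) else 0) - (if pvPos M p.2 ≤ i - 1 then (1:Int) else 0))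
          + ((if pvPos M (p.1 - 1) = i then (1:Int) else 0) + (if pvPos M p.2 = i then (-1:Int) else 0)) := by
      split_ifs <;> omega
    omega

-- ---- A's sweep as a pointwise map ----

theorem pvLoopA (updates : List (Int × Int)) (marks : List Int) (M n : Int)
    (hm : ∀ i : Int, 0 ≤ i → i < n → PySem.List.pyGetD marks i 0 = pvMark M updates i)
    (k : Nat) : ∀ (a : Int) (d : List Int), 0 ≤ a → a + k = n → (d.length : Int) = n →
    ((PySem.List.pyRange a n 1).foldl (pvStepNeg marks) (pvEff M updates (a - 1), d)).2
      = d.mapIdx (fun j x => if a ≤ (j : Int) ∧ PySem.Int.mod (pvEff M updates j) 2 ≠ 0 then -x else x) := by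
  induction k with
  | zero =>
    intro a d h0 hk hd
    rw [PySem.List.pyRange_one_eq_nil (by omega)]
    simp only [List.foldl_nil]
    refine List.ext_getElem (by simp) ?_
    intro j hj hj'
    simp only [List.getElem_mapIdx]
    rw [if_neg (by rintro ⟨hle, -⟩; omega)]
  | succ k ih =>
    intro a d h0 hk hd
    rw [PySem.List.pyRange_one_cons (show a < n by omega)]
    simp only [List.foldl_cons]
    have han : a < n := by omega
    have hat : a.toNat < d.length := by omega
    have hga : PySem.List.pyGetD d a 0 = d[a.toNat] :=
      PySem.List.pyGetD_eq_getElem d 0 h0 (by omega)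
    have hsa : PySem.List.pySetD d a (-(d[a.toNat])) = d.set a.toNat (-(d[a.toNat])) := by
      rw [pySetD_wrap d a _ (by omega) (by omega), pvPos_of_nonneg _ _ h0 (by omega)]
    have he : pvEff M updates (a - 1) + PySem.List.pyGetD marks a 0 = pvEff M updates a := by
      rw [hm a h0 han]; exact (pvEff_succ M updates a).symm
    have hta : ((a.toNat : Nat) : Int) = a := Int.toNat_of_nonneg h0
    by_cases hcond : PySem.Int.mod (pvEff M updates a) 2 ≠ 0
    · have hstep : pvStepNeg marks (pvEff M updates (a - 1), d) a
          = (pvEff M updates a, d.set a.toNat (-(d[a.toNat]))) := by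
        simp only [pvStepNeg, he, hga, hsa, if_pos hcond]
      rw [hstep]
      have := ih (a + 1) (d.set a.toNat (-(d[a.toNat]))) (by omega) (by omega) (by simp [hd])
      have harw : a + 1 - 1 = a := by omega
      rw [harw] at this
      rw [this]
      refine List.ext_getElem (by simp) ?_
      intro j hj hj'
      simp only [List.length_mapIdx, List.length_set] at hj hj'
      simp only [List.getElem_mapIdx, List.getElem_set]
      by_cases hja : a.toNat = j
      · subst hja
        rw [if_pos rfl, if_neg (by rintro ⟨hle, -⟩; omega), if_pos ⟨by omega, by rwa [hta]⟩]
      · rw [if_neg hja]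
        have hiff : ((a + 1 ≤ (j : Int)) ∧ PySem.Int.mod (pvEff M updates j) 2 ≠ 0)
            ↔ ((a ≤ (j : Int)) ∧ PySem.Int.mod (pvEff M updates j) 2 ≠ 0) := by
          constructor <;> (rintro ⟨h1, h2⟩; exact ⟨by omega, h2⟩)
        split_ifs with c1 c2 c2 <;> first | rfl | (exfalso; tauto)
    · have hstep : pvStepNeg marks (pvEff M updates (a - 1), d) a = (pvEff M updates a, d) := by
        simp only [pvStepNeg, he, if_neg hcond]
      rw [hstep]
      have := ih (a + 1) d (by omega) (by omega) hd
      have harw : a + 1 - 1 = a := by omega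
      rw [harw] at this
      rw [this]
      refine List.ext_getElem (by simp) ?_
      intro j hj hj'
      simp only [List.length_mapIdx] at hj hj'
      simp only [List.getElem_mapIdx]
      by_cases hja : a.toNat = j
      · subst hja
        rw [if_neg (by rintro ⟨hle, -⟩; omega), if_neg (by rintro ⟨-, h2⟩; rw [hta] at h2; exact hcond h2)]
      · have hiff : ((a + 1 ≤ (j : Int)) ∧ PySem.Int.mod (pvEff M updates j) 2 ≠ 0)
            ↔ ((a ≤ (j : Int)) ∧ PySem.Int.mod (pvEff M updates j) 2 ≠ 0) := by
          constructor <;> (rintro ⟨h1, h2⟩; exact ⟨by omega, h2⟩)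
        split_ifs with c1 c2 c2 <;> first | rfl | (exfalso; tauto)

-- ---- B's boundary fold ----

theorem stepTog_getD (m : List Bool) (p : Int × Int)
    (h1 : -(m.length : Int) ≤ p.1 - 1) (h2 : p.1 - 1 < (m.length : Int))
    (h3 : -(m.length : Int) ≤ p.2) (h4 : p.2 < (m.length : Int)) (j : Nat) (hj : j < m.length) :
    (pvStepTog m p).getD j false
      = xor (m.getD j false) (xor (decide (pvPos (m.length : Int) (p.1 - 1) = (j : Int)))
          (decide (pvPos (m.length : Int) p.2 = (j : Int)))) := by
  have hMpos : (0:Int) < (m.length : Int) := by omega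
  have hp1 := pvPos_nonneg (m.length : Int) (p.1 - 1) hMpos
  have hp1' := pvPos_lt (m.length : Int) (p.1 - 1) hMpos
  have hp2 := pvPos_nonneg (m.length : Int) p.2 hMpos
  have hp2' := pvPos_lt (m.length : Int) p.2 hMpos
  have ha : (pvPos (m.length : Int) (p.1 - 1)).toNat < m.length := by omega
  set a := (pvPos (m.length : Int) (p.1 - 1)).toNat with hadef
  have em1 : PySem.List.pySetD m (p.1 - 1) (!(PySem.List.pyGetD m (p.1 - 1) false))
      = m.set a (!(m[a])) := by
    rw [pyGetD_wrap m _ false h1 h2, pySetD_wrap m _ _ h1 h2, List.getD_eq_getElem m false ha]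
  have lm1 : (m.set a (!(m[a]))).length = m.length := by simp
  have hbn : (pvPos (m.length : Int) p.2).toNat < m.length := by omega
  set b := (pvPos (m.length : Int) p.2).toNat with hbdef
  have em2 : pvStepTog m p
      = (m.set a (!(m[a]))).set b (!((m.set a (!(m[a])))[b]'(by omega))) := by
    rw [pvStepTog, em1, pyGetD_wrap _ _ false (by rw [lm1]; exact h3) (by rw [lm1]; exact h4),
      pySetD_wrap _ _ _ (by rw [lm1]; exact h3) (by rw [lm1]; exact h4),
      List.getD_eq_getElem _ false (by rw [lm1] at *; omega)]
    simp only [lm1]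
    rfl
  rw [em2]
  simp only [List.getD_eq_getElem?_getD, List.getElem?_set, lm1, List.getElem_set]
  have hij1 : (pvPos (m.length : Int) (p.1 - 1) = (j : Int)) ↔ a = j := by
    simp only [pvPos] at *; omega
  have hij2 : (pvPos (m.length : Int) p.2 = (j : Int)) ↔ b = j := by
    simp only [pvPos] at *; omega
  by_cases e1 : a = j <;> by_cases e2 : b = j <;>
    simp [e1, e2, hj, hij1, hij2]

theorem pvStepTog_length (m : List Bool) (p : Int × Int) : (pvStepTog m p).length = m.length := by
  simp [pvStepTog, PySem.List.length_pySetD]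

theorem pvFoldTog_length (updates : List (Int × Int)) (m : List Bool) :
    (updates.foldl pvStepTog m).length = m.length := by
  induction updates generalizing m with
  | nil => rfl
  | cons p ups ih => simp [List.foldl_cons, ih, pvStepTog_length]

theorem pvXorParity (P Q : Prop) [Decidable P] [Decidable Q] (R : Int) :
    xor (xor (decide P) (decide Q)) (decide (R % 2 = 1))
      = decide (((((if P then (1:Int) else 0) + (if Q then (1:Int) else 0)) + R) % 2 = 1)) := by
  by_cases hP : P <;> by_cases hQ : Q <;>
    simp only [hP, hQ, decide_true, decide_false, if_true, if_false, Bool.not_true, Bool.false_xor, Bool.true_xor, Bool.xor_false, ← decide_not] <;>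
    rw [decide_eq_decide] <;> omega

theorem pvFoldTog_getD (updates : List (Int × Int)) (m : List Bool)
    (hb : ∀ p ∈ updates, -(m.length : Int) ≤ p.1 - 1 ∧ p.1 - 1 < (m.length : Int)
            ∧ -(m.length : Int) ≤ p.2 ∧ p.2 < (m.length : Int))
    (j : Nat) (hj : j < m.length) :
    (updates.foldl pvStepTog m).getD j false
      = xor (m.getD j false) (decide ((pvEndCnt (m.length : Int) updates j) % 2 = 1)) := by
  induction updates generalizing m with
  | nil => norm_num [pvEndCnt]
  | cons p ups ih =>
    have hp := hb p (List.mem_cons_self ..)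
    have hlen := pvStepTog_length m p
    rw [List.foldl_cons,
      ih (pvStepTog m p) (by rw [hlen]; exact fun q hq => hb q (List.mem_cons_of_mem _ hq)) (by omega),
      hlen, stepTog_getD m p hp.1 hp.2.1 hp.2.2.1 hp.2.2.2 j hj]
    rw [Bool.xor_assoc]
    congr 1
    simp only [pvEndCnt, List.map_cons, List.sum_cons]
    exact pvXorParity _ _ _

-- ---- prefix parity of the boundary list ----

theorem pvEndPre_neg_one (M : Int) (updates : List (Int × Int)) (hM : 0 < M) :
    pvEndPre M updates (-1) = 0 := by
  apply List.sum_eq_zero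
  intro x hx
  simp only [List.mem_map] at hx
  obtain ⟨p, hp, rfl⟩ := hx
  have n1 := pvPos_nonneg M (p.1 - 1) hM
  have n2 := pvPos_nonneg M p.2 hM
  split_ifs <;> omega

theorem pvEndPre_succ (M : Int) (updates : List (Int × Int)) (i : Int) :
    pvEndPre M updates i = pvEndPre M updates (i - 1) + pvEndCnt M updates i := by
  induction updates with
  | nil => simp [pvEndPre, pvEndCnt]
  | cons p ups ih =>
    simp only [pvEndPre, pvEndCnt, List.map_cons, List.sum_cons] at *
    have : (if pvPos M (p.1 - 1) ≤ i then (1:Int) else 0) + (if pvPos M p.2 ≤ i then (1:Int) else 0)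
        = ((if pvPos M (p.1 - 1) ≤ i - 1 then (1:Int) else 0) + (if pvPos M p.2 ≤ i - 1 then (1:Int) else 0))
          + ((if pvPos M (p.1 - 1) = i then (1:Int) else 0) + (if pvPos M p.2 = i then (1:Int) else 0)) := by
      split_ifs <;> omega
    omega

theorem pvEndPre_nonneg (M : Int) (updates : List (Int × Int)) (i : Int) :
    0 ≤ pvEndPre M updates i := by
  apply List.sum_nonneg
  intro x hx
  simp only [List.mem_map] at hx
  obtain ⟨p, hp, rfl⟩ := hx
  split_ifs <;> omega

theorem pvEndPre_parity (M : Int) (updates : List (Int × Int)) (i : Int) :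
    (pvEndPre M updates i - pvEff M updates i) % 2 = 0 := by
  induction updates with
  | nil => norm_num [pvEndPre, pvEff]
  | cons p ups ih =>
    simp only [pvEndPre, pvEff, List.map_cons, List.sum_cons] at *
    split_ifs <;> omega

theorem pvTakeCount (boundary : List Bool) (M : Int) (updates : List (Int × Int))
    (hM : 0 < M) (hbd : ∀ j : Nat, j < boundary.length →
      boundary.getD j false = decide ((pvEndCnt M updates (j : Int)) % 2 = 1)) :
    ∀ k : Nat, k ≤ boundary.length →
      (((boundary.take k).countP id : Nat) : Int) % 2
        = (pvEndPre M updates ((k : Int) - 1)) % 2 := by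
  intro k
  induction k with
  | zero =>
    intro _
    norm_num [pvEndPre_neg_one M updates hM]
  | succ k ih =>
    intro hk
    have hkl : k < boundary.length := by omega
    rw [List.take_add_one, List.countP_append, List.getElem?_eq_getElem hkl]
    have hg : boundary[k] = decide ((pvEndCnt M updates (k : Int)) % 2 = 1) := by
      rw [← List.getD_eq_getElem boundary false hkl]; exact hbd k hkl
    have hih := ih (by omega)
    push_cast
    have hredk : ((k : Int) + 1 - 1) = (k : Int) := by ring
    rw [hredk, pvEndPre_succ M updates (k : Int)]
    rcases Int.emod_two_eq (pvEndCnt M updates (k : Int)) with h | h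
    · have hgf : boundary[k] = false := by rw [hg, h]; norm_num
      rw [hgf]
      simp only [Option.toList_some, List.countP_cons, List.countP_nil, id_eq]
      push_cast
      omega
    · have hgt : boundary[k] = true := by rw [hg, h]; norm_num
      rw [hgt]
      simp only [Option.toList_some, List.countP_cons, List.countP_nil, id_eq]
      push_cast
      omega

-- ---- enumerate-comprehension as mapIdx ----

theorem pvEnumMap {α β : Type} (g : Int × α → β) (xs : List α) :
    ∀ s : Int, (PySem.List.enumerate xs s).map g
      = xs.mapIdx (fun j x => g (s + (j : Int), x)) := by
  induction xs with
  | nil => intro s; simp [PySem.List.enumerate_nil]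
  | cons x xs ih =>
    intro s
    rw [PySem.List.enumerate_cons, List.map_cons, ih (s + 1), List.mapIdx_cons]
    congr 1
    · norm_num
    · congr 1
      funext j y
      have hc : s + 1 + (j : Int) = s + ((j + 1 : Nat) : Int) := by push_cast; ring
      rw [hc]

-- ===== VERDICT (by name: the statement is the Claim_ definition above) =====
theorem getFinalData_spec : Claim_equal_getFinalData := by
  intro data updates _ hPre
  unfold Spec_getFinalData getFinalData getFinalData_alt
  set n := data.length with hn
  set M : Int := (n : Int) + 1 with hM
  have hMpos : (0:Int) < M := by omega
  -- the marks array
  set marks := updates.foldl pvStepMarks (List.replicate (n + 1) 0) with hmarks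
  have hmlen : marks.length = n + 1 := by rw [hmarks, pvFoldMarks_length]; simp
  have hbnd : ∀ p ∈ updates, -((List.replicate (n+1) (0:Int)).length : Int) ≤ p.1 - 1
      ∧ p.1 - 1 < ((List.replicate (n+1) (0:Int)).length : Int)
      ∧ -((List.replicate (n+1) (0:Int)).length : Int) ≤ p.2
      ∧ p.2 < ((List.replicate (n+1) (0:Int)).length : Int) := by
    intro p hp
    have := hPre p hp
    simp only [List.length_replicate]
    omega
  have hm : ∀ i : Int, 0 ≤ i → i < (n : Int) → PySem.List.pyGetD marks i 0 = pvMark M updates i := by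
    intro i h0 hi
    have hilt : i.toNat < marks.length := by omega
    rw [PySem.List.pyGetD_eq_getElem marks _ h0 (by omega), ← List.getD_eq_getElem marks 0 hilt,
      hmarks, pvFoldMarks_getD updates _ hbnd i.toNat (by simp; omega)]
    simp only [List.length_replicate]
    rw [hM]
    simp [Int.toNat_of_nonneg h0]
  -- the boundary array
  set boundary := updates.foldl pvStepTog (List.replicate (n + 1) false) with hbound
  have hblen : boundary.length = n + 1 := by rw [hbound, pvFoldTog_length]; simp
  have hbndB : ∀ p ∈ updates, -((List.replicate (n+1) false).length : Int) ≤ p.1 - 1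
      ∧ p.1 - 1 < ((List.replicate (n+1) false).length : Int)
      ∧ -((List.replicate (n+1) false).length : Int) ≤ p.2
      ∧ p.2 < ((List.replicate (n+1) false).length : Int) := by
    intro p hp
    have := hPre p hp
    simp only [List.length_replicate]
    omega
  have hbd : ∀ j : Nat, j < boundary.length →
      boundary.getD j false = decide ((pvEndCnt M updates (j : Int)) % 2 = 1) := by
    intro j hj
    rw [hbound, pvFoldTog_getD updates _ hbndB j (by simp; omega)]
    simp only [List.length_replicate]
    rw [hM]
    simp
  -- per-index value of B
  have hBval : ∀ j : Nat, j < n → pvPrefixOdd boundary (j : Int)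
      = decide (PySem.Int.mod (pvEff M updates (j : Int)) 2 ≠ 0) := by
    intro j hj
    have hsl : PySem.List.slice boundary none (some ((j : Int) + 1)) = boundary.take (j + 1) := by
      have : ((j : Int) + 1) = (((j + 1 : Nat)) : Int) := by push_cast; ring
      rw [this, PySem.List.slice_to_natCast]
    have hcnt := pvTakeCount boundary M updates hMpos hbd (j + 1) (by omega)
    have hpe := pvEndPre_parity M updates (j : Int)
    have hpn := pvEndPre_nonneg M updates ((j : Int) + 1 - 1)
    unfold pvPrefixOdd
    rw [hsl]
    have hred : ((j + 1 : Nat) : Int) - 1 = (j : Int) := by push_cast; ring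
    rw [hred] at hcnt
    rw [PySem.Int.mod_eq_emod_of_pos (show (0:Int) < 2 by norm_num),
      PySem.Int.mod_eq_emod_of_pos (show (0:Int) < 2 by norm_num), decide_eq_decide]
    omega
  -- A's sweep
  have hA := pvLoopA updates marks M (n : Int) hm n 0 data (le_refl 0) (by omega) (by omega)
  have h0 : pvEff M updates (0 - 1) = 0 := by
    have : pvEndPre M updates (-1) = 0 := pvEndPre_neg_one M updates hMpos
    have hp := pvEndPre_parity M updates (-1)
    have : pvEff M updates (0 - 1) = pvEff M updates (-1) := by norm_num
    rw [this]
    -- eff at -1 is 0: every indicator is 0 since positions are nonnegative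
    apply List.sum_eq_zero
    intro x hx
    simp only [List.mem_map] at hx
    obtain ⟨p, hp', rfl⟩ := hx
    have n1 := pvPos_nonneg M (p.1 - 1) hMpos
    have n2 := pvPos_nonneg M p.2 hMpos
    split_ifs <;> omega
  rw [h0] at hA
  rw [hA, pvEnumMap, ← hbound]
  refine List.ext_getElem (by simp) ?_
  intro j hj hj'
  simp only [List.length_mapIdx] at hj hj'
  simp only [List.getElem_mapIdx, zero_add]
  rw [hBval j (by omega)]
  split_ifs with c1 c2 c2 <;> simp_all
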